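-- pv_equiv track=rewrite | github.com/springin98/Algorithm | 프로그래머스/lv0/120843. 공 던지기/공 던지기.py | solution
-- ===== SOURCE A (Python) =====
-- from collections import deque
--
-- def solution(numbers, k):
--     dq = deque(numbers)
--     cnt = 1
--     while cnt != k :
--         dq.append(dq.popleft())
--         dq.append(dq.popleft())
--         cnt += 1
--
--     return dq[0]
-- ===== SOURCE B (Python) =====
-- def solution(numbers, k):
--     return numbers[2 * (k - 1) % len(numbers)]
-- ===== Notes on version B (the rewrite author's own statement) =====
-- stated objective: faster
-- what changed: Replaces the O(k) deque rotation loop by the closed-form index 2*(k-1) mod len(numbers).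
import Mathlib
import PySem

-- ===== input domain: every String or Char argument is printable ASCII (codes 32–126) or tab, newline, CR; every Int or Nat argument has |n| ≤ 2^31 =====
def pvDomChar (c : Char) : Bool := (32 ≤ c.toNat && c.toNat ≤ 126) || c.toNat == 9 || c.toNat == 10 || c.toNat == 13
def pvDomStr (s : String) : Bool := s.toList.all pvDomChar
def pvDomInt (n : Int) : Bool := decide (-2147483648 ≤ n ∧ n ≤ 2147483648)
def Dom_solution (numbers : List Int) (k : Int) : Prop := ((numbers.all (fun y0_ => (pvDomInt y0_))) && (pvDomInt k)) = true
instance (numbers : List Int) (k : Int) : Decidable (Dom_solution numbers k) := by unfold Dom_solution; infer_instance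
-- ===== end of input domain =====

-- B replaces A's O(k) rotate-by-two loop with the closed-form index 2*(k-1) mod len(numbers) (O(1)).

-- ===== PORT A =====
-- one dq.append(dq.popleft()): the head moves to the back ([] unreachable under Pre_, where Python would raise)
def pvStep (dq : List Int) : List Int :=
  match dq with
  | [] => []
  | x :: xs => xs ++ [x]

-- the while loop: runs until cnt = k, i.e. (k-1) iterations under Pre_, two popleft/append per iteration
def pvLoop : Nat → List Int → List Int
  | 0, dq => dq
  | n + 1, dq => pvLoop n (pvStep (pvStep dq))

def solution (numbers : List Int) (k : Int) : Int :=
  (pvLoop (k - 1).toNat numbers).headD 0   -- dq[0]; default 0 unreachable under Pre_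

-- ===== PORT B =====
def solution_alt (numbers : List Int) (k : Int) : Int :=
  (PySem.List.pyGet? numbers (PySem.Int.mod (2 * (k - 1)) numbers.length)).getD 0

-- ===== PRECONDITION & SPEC =====
-- A raises (IndexError on an empty deque) when numbers = [], and loops forever when k < 1.
def Pre_solution (numbers : List Int) (k : Int) : Prop := numbers ≠ [] ∧ 1 ≤ k
instance (numbers : List Int) (k : Int) : Decidable (Pre_solution numbers k) := by
  unfold Pre_solution; infer_instance

def pvWitness_solution : List Int × Int := ([1, 2, 3, 4], 3)

def Spec_solution (numbers : List Int) (k : Int) (out : Int) : Prop := out = solution_alt numbers k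
instance (numbers : List Int) (k : Int) (out : Int) : Decidable (Spec_solution numbers k out) := by
  unfold Spec_solution; infer_instance

-- ===== CLAIM (what is proved, stated in full; the proofs are below) =====
def Claim_equal_solution : Prop := ∀ (numbers : List Int) (k : Int), Dom_solution numbers k → Pre_solution numbers k → Spec_solution numbers k (solution numbers k)

-- ===== LEMMAS AND PROOFS =====

theorem pvStep_eq_rotate (dq : List Int) : pvStep dq = dq.rotate 1 := by
  cases dq with
  | nil => rfl
  | cons x xs => simp [pvStep, List.rotate_cons_succ]

theorem pvLoop_eq_rotate (n : Nat) (dq : List Int) : pvLoop n dq = dq.rotate (2 * n) := by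
  induction n generalizing dq with
  | zero => simp [pvLoop]
  | succ m ih =>
    simp only [pvLoop, ih, pvStep_eq_rotate, List.rotate_rotate]
    congr 1
    omega

theorem solution_spec' (numbers : List Int) (k : Int)
    (hne : numbers ≠ []) (hk : 1 ≤ k) :
    solution numbers k = solution_alt numbers k := by
  have hL : 0 < numbers.length := List.length_pos_iff.mpr hne
  set m : Nat := (k - 1).toNat with hm
  have hk2 : 2 * (k - 1) = ((2 * m : Nat) : Int) := by omega
  -- A side: head of the rotated list
  have hlen : 0 < (numbers.rotate (2 * m)).length := by simpa using hL
  have hA : solution numbers k = numbers[(0 + 2 * m) % numbers.length]'(by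
      exact Nat.mod_lt _ hL) := by
    rw [solution, ← hm, pvLoop_eq_rotate]
    have hg := List.getElem_rotate numbers (2 * m) 0 hlen
    cases hx : numbers.rotate (2 * m) with
    | nil => rw [hx] at hlen; simp at hlen
    | cons a t =>
      have ha : (numbers.rotate (2 * m))[0]'hlen = a := by simp [hx]
      exact ha.symm.trans hg
  -- B side: the direct index
  have hB : solution_alt numbers k = numbers[(2 * m) % numbers.length]'(Nat.mod_lt _ hL) := by
    rw [solution_alt, hk2, PySem.Int.mod_natCast, PySem.List.pyGet?_natCast]
    rw [List.getElem?_eq_getElem (Nat.mod_lt _ hL)]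
    rfl
  rw [hA, hB]
  simp

-- ===== VERDICT (by name: the statement is the Claim_ definition above) =====
theorem solution_spec : Claim_equal_solution := by
  intro numbers k _ hpre
  exact solution_spec' numbers k hpre.1 hpre.2
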